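-- pv_equiv track=rewrite | github.com/CristianNorga/kc_connecta_game | game/utils/list_utils.py | find_streak
-- ===== SOURCE A (Python) =====
-- def find_streak(list, needle, n) -> bool:
--     if n < 1:
--         return False
--
--     current_streak = 0
--     for item in list:
--         if item == needle:
--             current_streak += 1
--             if current_streak >= n:
--                 return True
--         else:
--             current_streak = 0
--
--     return False
-- ===== SOURCE B (Python) =====
-- def find_streak(list, needle, n) -> bool:
--     if n < 1:
--         return False
--     i = 0
--     length = len(list)
--     while i < length:
--         if list[i] == needle:
--             j = i + 1
--             while j < length and list[j] == needle:
--                 j += 1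
--             if j - i >= n:
--                 return True
--             i = j
--         else:
--             i += 1
--     return False
-- ===== Notes on version B (the rewrite author's own statement) =====
-- stated objective: alternative
-- what changed: B scans the list as maximal runs: on a match it measures the whole consecutive matching run at once and skips past it, instead of A's per-element reset counter.
import Mathlib
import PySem

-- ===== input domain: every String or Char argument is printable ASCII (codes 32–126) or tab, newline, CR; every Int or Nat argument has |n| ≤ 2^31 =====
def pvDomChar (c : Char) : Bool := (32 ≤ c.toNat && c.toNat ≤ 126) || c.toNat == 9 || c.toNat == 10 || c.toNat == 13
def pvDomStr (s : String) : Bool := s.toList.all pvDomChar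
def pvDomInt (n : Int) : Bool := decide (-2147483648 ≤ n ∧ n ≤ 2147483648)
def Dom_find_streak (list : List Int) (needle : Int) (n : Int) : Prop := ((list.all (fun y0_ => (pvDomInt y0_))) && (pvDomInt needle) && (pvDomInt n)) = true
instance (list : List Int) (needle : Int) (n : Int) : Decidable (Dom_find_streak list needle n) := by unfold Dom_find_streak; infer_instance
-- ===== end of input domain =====

-- B replaces A's per-element reset counter with a run-scan that measures each
-- maximal matching run and skips it (alternative decomposition, same cost).

-- ===== PORT A =====
-- A's for-loop with a reset counter, as structural recursion over the list.
def findStreakGoA (needle n : Int) : List Int → Int → Bool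
  | [], _ => false
  | x :: xs, cur =>
      if x = needle then
        if n ≤ cur + 1 then true else findStreakGoA needle n xs (cur + 1)
      else findStreakGoA needle n xs 0

def find_streak (list : List Int) (needle : Int) (n : Int) : Bool :=
  if n < 1 then false else findStreakGoA needle n list 0

-- ===== PORT B =====
-- B's outer while-loop over the suffix: on a match, measure the whole run
-- (inner while = takeWhile) and skip past it (dropWhile); else advance one.
def findStreakGoB (needle n : Int) : List Int → Bool
  | [] => false
  | x :: xs =>
      if x = needle then
        if n ≤ (1 + (xs.takeWhile (fun y => decide (y = needle))).length : Int) then true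
        else findStreakGoB needle n (xs.dropWhile (fun y => decide (y = needle)))
      else findStreakGoB needle n xs
termination_by l => l.length
decreasing_by
  · exact Nat.lt_succ_of_le (List.length_dropWhile_le _ _)
  · exact Nat.lt_succ_self _

def find_streak_alt (list : List Int) (needle : Int) (n : Int) : Bool :=
  if n < 1 then false else findStreakGoB needle n list

-- ===== PRECONDITION & SPEC =====
def Spec_find_streak (list : List Int) (needle : Int) (n : Int) (out : Bool) : Prop := out = find_streak_alt list needle n
instance (list : List Int) (needle : Int) (n : Int) (out : Bool) : Decidable (Spec_find_streak list needle n out) := by unfold Spec_find_streak; infer_instance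

-- ===== CLAIM (what is proved, stated in full; the proofs are below) =====
def Claim_equal_find_streak : Prop := ∀ (list : List Int) (needle : Int) (n : Int), Dom_find_streak list needle n → Spec_find_streak list needle n (find_streak list needle n)

-- ===== LEMMAS AND PROOFS =====

theorem findStreakGoB_cons (needle n x : Int) (xs : List Int) :
    findStreakGoB needle n (x :: xs) =
      if x = needle then
        if n ≤ (1 + (xs.takeWhile (fun y => decide (y = needle))).length : Int) then true
        else findStreakGoB needle n (xs.dropWhile (fun y => decide (y = needle)))
      else findStreakGoB needle n xs := by
  rw [findStreakGoB.eq_def]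

-- A over an all-matching block, with cur < n: either the block reaches n or the
-- loop continues after it with counter cur + block length.
theorem findStreakGoA_match_block (needle n : Int) (as bs : List Int) (cur : Int)
    (hall : ∀ a ∈ as, a = needle) (hlt : cur < n) :
    findStreakGoA needle n (as ++ bs) cur =
      if n ≤ cur + (as.length : Int) then true else findStreakGoA needle n bs (cur + (as.length : Int)) := by
  induction as generalizing cur with
  | nil =>
    simp only [List.nil_append, List.length_nil, Nat.cast_zero, add_zero]
    rw [if_neg (not_le.mpr hlt)]
  | cons a as ih =>
    have ha : a = needle := hall a (by simp)
    simp only [List.cons_append, findStreakGoA, if_pos ha]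
    by_cases h1 : n ≤ cur + 1
    · rw [if_pos h1, if_pos (by simp; omega)]
    · rw [if_neg h1, ih (cur + 1) (fun a ha => hall a (by simp [ha])) (by omega)]
      have : cur + 1 + ((as.length : Nat) : Int) = cur + ((as.length + 1 : Nat) : Int) := by
        push_cast
        ring
      simp [this]

-- After a failed matching block the next element (if any) is a non-match, so the
-- leftover counter is irrelevant.
theorem findStreakGoA_reset (needle n : Int) (d : List Int) (cur : Int)
    (hd : ∀ x, ∀ t, d = x :: t → x ≠ needle) :
    findStreakGoA needle n d cur = findStreakGoA needle n d 0 := by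
  cases d with
  | nil => rfl
  | cons x t =>
    have hx : x ≠ needle := hd x t rfl
    simp [findStreakGoA, if_neg hx]

theorem findStreak_main (needle n : Int) (hn : 1 ≤ n) :
    ∀ xs : List Int, findStreakGoA needle n xs 0 = findStreakGoB needle n xs := by
  intro xs
  induction hL : xs.length using Nat.strong_induction_on generalizing xs with
  | _ L ih =>
  subst hL
  cases xs with
  | nil => simp [findStreakGoA, findStreakGoB]
  | cons x xs =>
    by_cases hx : x = needle
    · set p : Int → Bool := fun y => decide (y = needle) with hp
      set t := xs.takeWhile p with ht
      set d := xs.dropWhile p with hdd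
      have hsplit : x :: xs = (x :: t) ++ d := by
        simp [ht, hdd, List.takeWhile_append_dropWhile]
      have hall : ∀ a ∈ x :: t, a = needle := by
        intro a ha
        rcases List.mem_cons.mp ha with h | h
        · exact h ▸ hx
        · have := List.mem_takeWhile_imp (ht ▸ h)
          simpa [hp] using this
      have hblock := findStreakGoA_match_block needle n (x :: t) d 0 hall (by omega)
      have hlen : (0 : Int) + (((x :: t).length : Nat) : Int) = 1 + (t.length : Int) := by
        simp [List.length_cons]; ring
      rw [hsplit, hblock, ← hsplit, findStreakGoB_cons, if_pos hx]
      by_cases hbig : n ≤ 1 + (t.length : Int)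
      · rw [if_pos (by omega), if_pos (by simpa [ht, hp] using hbig)]
      · rw [if_neg (by omega), if_neg (by simpa [ht, hp] using hbig)]
        have hdhead : ∀ y, ∀ u, d = y :: u → y ≠ needle := by
          intro y u hy
          have : p y = false := by
            have := List.head?_dropWhile_not (p := p) (l := xs)
            rw [← hdd, hy] at this
            simpa using this
          simpa [hp] using this
        rw [findStreakGoA_reset needle n d _ hdhead]
        have hdlen : d.length < (x :: xs).length :=
          Nat.lt_succ_of_le (hdd ▸ List.length_dropWhile_le _ _)
        rw [ih d.length hdlen d rfl]
    · rw [findStreakGoB_cons, if_neg hx]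
      have : findStreakGoA needle n (x :: xs) 0 = findStreakGoA needle n xs 0 := by
        simp [findStreakGoA, if_neg hx]
      rw [this, ih xs.length (by simp) xs rfl]

-- ===== VERDICT (by name: the statement is the Claim_ definition above) =====
theorem find_streak_spec : Claim_equal_find_streak := by
  intro list needle n _
  unfold Spec_find_streak find_streak find_streak_alt
  by_cases h : n < 1
  · simp [if_pos h]
  · simp only [if_neg h]
    exact findStreak_main needle n (by omega) list
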